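-- pv_equiv track=rewrite | github.com/mju-bigdataprograming-team9/BDP-Project-Team9 | count/policy_5/bf.py | assign_policy_type_with_top10
-- ===== SOURCE A (Python) =====
-- def assign_policy_type_with_top10(row, policy_medians, top10_thresholds):
--     valid_policies = {}
--     for policy, median in policy_medians.items():
--         if row[policy] > median and row[policy] >= top10_thresholds[policy]:
--             valid_policies[policy] = row[policy]
--     if valid_policies:
--         return max(valid_policies, key=valid_policies.get)
--     return "None"
-- ===== SOURCE B (Python) =====
-- def assign_policy_type_with_top10(row, policy_medians, top10_thresholds):
--     # Single pass: keep the running best (policy, value) instead of materialising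
--     # a dict of all valid policies and scanning it again with max().
--     best = None
--     for policy, median in policy_medians.items():
--         value = row[policy]
--         if value > median and value >= top10_thresholds[policy] and (best is None or value > best[1]):
--             best = (policy, value)
--     return best[0] if best else "None"
-- ===== Notes on version B (the rewrite author's own statement) =====
-- stated objective: simpler
-- what changed: Fuses A's build-a-dict-of-valid-policies-then-max(key=get) two-phase structure into one incremental scan that keeps only the running best (policy, value) pair, updating on strictly greater values to reproduce max's first-occurrence tie-breaking.
import Mathlib
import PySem

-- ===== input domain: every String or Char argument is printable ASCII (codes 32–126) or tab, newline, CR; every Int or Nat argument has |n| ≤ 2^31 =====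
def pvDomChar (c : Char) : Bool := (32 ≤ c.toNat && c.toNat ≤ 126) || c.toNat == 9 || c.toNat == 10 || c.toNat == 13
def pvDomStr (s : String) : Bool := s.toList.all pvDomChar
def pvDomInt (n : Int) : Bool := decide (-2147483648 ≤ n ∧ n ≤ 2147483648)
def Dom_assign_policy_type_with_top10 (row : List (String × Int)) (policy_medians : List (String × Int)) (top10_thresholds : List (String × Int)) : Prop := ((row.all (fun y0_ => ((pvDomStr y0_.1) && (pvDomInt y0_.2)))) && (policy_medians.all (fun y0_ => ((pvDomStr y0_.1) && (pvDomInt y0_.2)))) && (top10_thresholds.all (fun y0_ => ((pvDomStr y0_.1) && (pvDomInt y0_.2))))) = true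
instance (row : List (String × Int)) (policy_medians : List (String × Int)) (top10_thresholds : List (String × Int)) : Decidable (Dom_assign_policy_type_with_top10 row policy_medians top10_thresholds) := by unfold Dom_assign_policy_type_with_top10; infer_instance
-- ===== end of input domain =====

-- B replaces A's two-phase "collect all valid policies in a dict, then max(key=get)"
-- with a single pass keeping only the running best (policy, value); objective: simpler.

-- ===== PORT A =====
-- row[k] / top10_thresholds[k]: Python dict lookup (dicts are passed as association lists)
def pvGet (d : List (String × Int)) (k : String) : Option Int := (PySem.Dict.ofList d).get? k

-- the body of A's for-loop: conditionally insert into valid_policies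
def pvStepA (row thr : List (String × Int)) (d : PySem.Dict String Int) (p : String × Int) : PySem.Dict String Int :=
  match pvGet row p.1 with
  | none => d            -- Python: KeyError (excluded by Pre_)
  | some rv =>
    if p.2 < rv then
      match pvGet thr p.1 with
      | none => d        -- Python: KeyError (excluded by Pre_)
      | some tv => if tv ≤ rv then d.insert p.1 rv else d
    else d

def assign_policy_type_with_top10 (row : List (String × Int)) (policy_medians : List (String × Int)) (top10_thresholds : List (String × Int)) : String :=
  let valid := ((PySem.Dict.ofList policy_medians).items).foldl (pvStepA row top10_thresholds) PySem.Dict.empty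
  if valid.size ≠ 0 then
    (PySem.List.max? valid.keys (fun k => valid.getD k 0)).getD "None"
  else "None"

-- ===== PORT B =====
-- the body of B's for-loop: update the running best on a strictly greater valid value
def pvStepB (row thr : List (String × Int)) (b : String × Option Int) (p : String × Int) : String × Option Int :=
  match pvGet row p.1 with
  | none => b            -- Python: KeyError (excluded by Pre_)
  | some v =>
    if decide (p.2 < v) && ((pvGet thr p.1).elim false (fun tv => decide (tv ≤ v)))
        && b.2.all (fun bv => decide (bv < v)) then
      (p.1, some v)
    else b

def assign_policy_type_with_top10_alt (row : List (String × Int)) (policy_medians : List (String × Int)) (top10_thresholds : List (String × Int)) : String :=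
  (((PySem.Dict.ofList policy_medians).items).foldl (pvStepB row top10_thresholds) ("None", none)).1

-- ===== PRECONDITION & SPEC =====
-- Pre_ excludes exactly the inputs where Python A raises KeyError: a policy of
-- policy_medians missing from row, or passing the median test (where 'and'
-- short-circuits) while missing from top10_thresholds.
def Pre_assign_policy_type_with_top10 (row : List (String × Int)) (policy_medians : List (String × Int)) (top10_thresholds : List (String × Int)) : Prop :=
  ∀ p ∈ (PySem.Dict.ofList policy_medians).items,
    ((PySem.Dict.ofList row).get? p.1).isSome = true ∧
    (p.2 < ((PySem.Dict.ofList row).get? p.1).getD 0 →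
      ((PySem.Dict.ofList top10_thresholds).get? p.1).isSome = true)
instance (row : List (String × Int)) (policy_medians : List (String × Int)) (top10_thresholds : List (String × Int)) : Decidable (Pre_assign_policy_type_with_top10 row policy_medians top10_thresholds) := by unfold Pre_assign_policy_type_with_top10; infer_instance

def pvWitness_assign_policy_type_with_top10 : (List (String × Int)) × (List (String × Int)) × (List (String × Int)) :=
  ([("a", 5), ("b", 1)], [("a", 1), ("b", 0)], [("a", 2), ("b", 9)])

def Spec_assign_policy_type_with_top10 (row : List (String × Int)) (policy_medians : List (String × Int)) (top10_thresholds : List (String × Int)) (out : String) : Prop := out = assign_policy_type_with_top10_alt row policy_medians top10_thresholds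
instance (row : List (String × Int)) (policy_medians : List (String × Int)) (top10_thresholds : List (String × Int)) (out : String) : Decidable (Spec_assign_policy_type_with_top10 row policy_medians top10_thresholds out) := by unfold Spec_assign_policy_type_with_top10; infer_instance

-- ===== CLAIM (what is proved, stated in full; the proofs are below) =====
def Claim_equal_assign_policy_type_with_top10 : Prop := ∀ (row : List (String × Int)) (policy_medians : List (String × Int)) (top10_thresholds : List (String × Int)), Dom_assign_policy_type_with_top10 row policy_medians top10_thresholds → Pre_assign_policy_type_with_top10 row policy_medians top10_thresholds → Spec_assign_policy_type_with_top10 row policy_medians top10_thresholds (assign_policy_type_with_top10 row policy_medians top10_thresholds)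

-- ===== LEMMAS AND PROOFS =====

-- the loop invariant tying A's dict of valid policies to B's running best
def PvRel (row : List (String × Int)) (d : PySem.Dict String Int) (b : String × Option Int) : Prop :=
  match b.2 with
  | none => d.items = [] ∧ b.1 = "None"
  | some bv => pvGet row b.1 = some bv ∧
      PySem.List.max? d.keys (fun k => d.getD k 0) = some b.1 ∧ d.getD b.1 0 = bv

-- max? only looks at the key function on members of the list
theorem pv_max?_congr {α κ : Type} [LT κ] [DecidableLT κ] (f g : α → κ)
    (xs : List α) (h : ∀ x ∈ xs, f x = g x) :
    PySem.List.max? xs f = PySem.List.max? xs g := by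
  unfold PySem.List.max?
  have H : ∀ (ys : List α) (acc : Option α), (∀ x ∈ ys, f x = g x) →
      (∀ m, acc = some m → f m = g m) →
      ys.foldl (fun acc x => match acc with
        | none => some x
        | some m => if f m < f x then some x else some m) acc
      = ys.foldl (fun acc x => match acc with
        | none => some x
        | some m => if g m < g x then some x else some m) acc := by
    intro ys
    induction ys with
    | nil => intro acc _ _; rfl
    | cons y t ih =>
      intro acc hys hacc
      have hy : f y = g y := hys y (by simp)
      have ht : ∀ x ∈ t, f x = g x := fun x hx => hys x (by simp [hx])
      cases acc with
      | none =>
        simp only [List.foldl_cons]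
        exact ih (some y) ht (by intro m hm; cases hm; exact hy)
      | some m =>
        have hm : f m = g m := hacc m rfl
        simp only [List.foldl_cons, hm, hy]
        split
        · exact ih (some y) ht (by intro m' hm'; cases hm'; exact hy)
        · exact ih (some m) ht (by intro m' hm'; cases hm'; exact hm)
  exact H xs none h (by intro m hm; cases hm)

-- one step over the list, all four skip cases and the two candidate cases
theorem pv_main (row thr : List (String × Int)) (l : List (String × Int))
    (d : PySem.Dict String Int) (b : String × Option Int)
    (hval : ∀ kv ∈ d.items, pvGet row kv.1 = some kv.2)
    (hnd : d.keys.Nodup) (hrel : PvRel row d b) :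
    (∀ kv ∈ (l.foldl (pvStepA row thr) d).items, pvGet row kv.1 = some kv.2) ∧
    (l.foldl (pvStepA row thr) d).keys.Nodup ∧
    PvRel row (l.foldl (pvStepA row thr) d) (l.foldl (pvStepB row thr) b) := by
  induction l generalizing d b with
  | nil => exact ⟨hval, hnd, hrel⟩
  | cons p t ih =>
    simp only [List.foldl_cons]
    rcases hre : pvGet row p.1 with _ | rv
    · -- row lookup misses: both steps are the identity
      have hA : pvStepA row thr d p = d := by simp [pvStepA, hre]
      have hB : pvStepB row thr b p = b := by simp [pvStepB, hre]
      rw [hA, hB]; exact ih d b hval hnd hrel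
    by_cases hmed : p.2 < rv
    case neg =>
      have hA : pvStepA row thr d p = d := by simp [pvStepA, hre, hmed]
      have hB : pvStepB row thr b p = b := by simp [pvStepB, hre, hmed]
      rw [hA, hB]; exact ih d b hval hnd hrel
    rcases hth : pvGet thr p.1 with _ | tv
    · have hA : pvStepA row thr d p = d := by simp [pvStepA, hre, hmed, hth]
      have hB : pvStepB row thr b p = b := by simp [pvStepB, hre, hmed, hth]
      rw [hA, hB]; exact ih d b hval hnd hrel
    by_cases htop : tv ≤ rv
    case neg =>
      have hA : pvStepA row thr d p = d := by simp [pvStepA, hre, hmed, hth, htop]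
      have hB : pvStepB row thr b p = b := by simp [pvStepB, hre, hmed, hth, htop]
      rw [hA, hB]; exact ih d b hval hnd hrel
    -- candidate: A inserts (p.1, rv)
    have hA : pvStepA row thr d p = d.insert p.1 rv := by
      simp [pvStepA, hre, hmed, hth, htop]
    by_cases hcont : d.contains p.1 = true
    · -- key already present with the same value: A's insert and B's step are no-ops
      rcases hw : d.get? p.1 with _ | w
      · rw [PySem.Dict.get?_eq_none_iff_contains] at hw; rw [hcont] at hw; cases hw
      have hmem : (p.1, w) ∈ d.items := PySem.Dict.mem_items_of_get?_eq_some d hw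
      have hwrv : w = rv := by
        have := hval _ hmem; rw [hre] at this; exact (Option.some.injEq _ _).mp this.symm
      subst hwrv
      have hAid : d.insert p.1 w = d := by
        apply PySem.Dict.ext
        rw [PySem.Dict.items_insert_of_contains d _ hcont]
        have : ∀ q ∈ d.items, (fun q => if q.1 == p.1 then (p.1, w) else q) q = id q := by
          intro q hq
          by_cases hqk : q.1 = p.1
          · have := hval q hq
            rw [hqk, hre] at this
            have hq2 : q.2 = w := (Option.some.injEq _ _).mp this.symm
            obtain ⟨q1, q2⟩ := q
            simp only at hqk hq2
            subst hqk; subst hq2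
            simp
          · simp [hqk]
        rw [List.map_congr_left this, List.map_id]
      rcases hb : b.2 with _ | bv
      · -- empty dict contradicts membership
        rw [PvRel, hb] at hrel
        rw [hrel.1] at hmem; cases hmem
      · have hBid : pvStepB row thr b p = b := by
          rw [PvRel, hb] at hrel
          have hk := PySem.Dict.mem_keys_of_mem_items d hmem
          have hle := PySem.List.max?_isMax hrel.2.1 p.1 hk
          have hgd : d.getD p.1 0 = w := PySem.Dict.getD_of_get?_eq_some d 0 hw
          rw [hgd, hrel.2.2] at hle
          have : ¬ bv < w := not_lt.mpr hle
          simp [pvStepB, hre, hmed, hth, htop, hb, this]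
        rw [hA, hAid, hBid]; exact ih d b hval hnd hrel
    · -- fresh key: A appends, B updates iff strictly greater
      have hcf : d.contains p.1 = false := by
        cases h : d.contains p.1
        · rfl
        · exact absurd h hcont
      have hnk : p.1 ∉ d.keys := by
        intro hk
        exact hcont ((PySem.Dict.contains_iff_mem_keys d p.1).mpr hk)
      have hitems : (d.insert p.1 rv).items = d.items ++ [(p.1, rv)] :=
        PySem.Dict.items_insert_of_not_contains d rv hcf
      have hkeys : (d.insert p.1 rv).keys = d.keys ++ [p.1] := by
        simp only [PySem.Dict.keys, hitems, List.map_append, List.map_cons, List.map_nil]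
      have hval' : ∀ kv ∈ (d.insert p.1 rv).items, pvGet row kv.1 = some kv.2 := by
        intro kv hkv
        rw [hitems, List.mem_append] at hkv
        rcases hkv with hkv | hkv
        · exact hval kv hkv
        · simp only [List.mem_singleton] at hkv; subst hkv; exact hre
      have hnd' : (d.insert p.1 rv).keys.Nodup := by
        rw [hkeys]
        exact List.Nodup.append hnd (List.nodup_singleton _)
          (List.disjoint_singleton.mpr hnk)
      have hgd' : ∀ x, (d.insert p.1 rv).getD x 0 = if x = p.1 then rv else d.getD x 0 :=
        fun x => PySem.Dict.getD_insert d p.1 x rv 0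
      rcases hb : b.2 with _ | bv
      · -- no best yet: the dict was empty, B takes the candidate
        rw [PvRel, hb] at hrel
        have hB : pvStepB row thr b p = (p.1, some rv) := by
          simp [pvStepB, hre, hmed, hth, htop, hb]
        have hkeys0 : d.keys = [] := by
          simp only [PySem.Dict.keys, hrel.1, List.map_nil]
        have hrel' : PvRel row (d.insert p.1 rv) (p.1, some rv) := by
          refine ⟨hre, ?_, ?_⟩
          · rw [hkeys, hkeys0]
            simp [PySem.List.max?]
          · rw [hgd' p.1]; simp
        rw [hA, hB]
        exact ih _ _ hval' hnd' hrel'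
      · rw [PvRel, hb] at hrel
        obtain ⟨hbrow, hbmax, hbgd⟩ := hrel
        have hbk : b.1 ∈ d.keys := PySem.List.max?_mem hbmax
        have hbne : b.1 ≠ p.1 := fun h => hnk (by rw [← h]; exact hbk)
        have hcongr : PySem.List.max? d.keys (fun k => (d.insert p.1 rv).getD k 0)
            = some b.1 := by
          rw [pv_max?_congr _ (fun k => d.getD k 0) d.keys ?_, hbmax]
          intro x hx
          rw [hgd' x, if_neg (fun h => hnk (by rw [← h]; exact hx))]
        have hmax' : PySem.List.max? (d.insert p.1 rv).keys
            (fun k => (d.insert p.1 rv).getD k 0)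
            = if bv < rv then some p.1 else some b.1 := by
          rw [hkeys]
          unfold PySem.List.max? at hcongr ⊢
          rw [List.foldl_append, hcongr]
          simp only [List.foldl_cons, List.foldl_nil]
          simp [hgd', hbne, hbgd]
        by_cases hlt : bv < rv
        · have hB : pvStepB row thr b p = (p.1, some rv) := by
            simp [pvStepB, hre, hmed, hth, htop, hb, hlt]
          have hrel' : PvRel row (d.insert p.1 rv) (p.1, some rv) := by
            refine ⟨hre, ?_, ?_⟩
            · rw [hmax', if_pos hlt]
            · rw [hgd' p.1]; simp
          rw [hA, hB]
          exact ih _ _ hval' hnd' hrel'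
        · have hB : pvStepB row thr b p = b := by
            simp [pvStepB, hre, hmed, hth, htop, hb, hlt]
          have hrel' : PvRel row (d.insert p.1 rv) b := by
            rw [PvRel, hb]
            refine ⟨hbrow, ?_, ?_⟩
            · rw [hmax', if_neg hlt]
            · rw [hgd' b.1, if_neg hbne, hbgd]
          rw [hA, hB]
          exact ih _ _ hval' hnd' hrel'

-- ===== VERDICT (by name: the statement is the Claim_ definition above) =====
theorem assign_policy_type_with_top10_spec : Claim_equal_assign_policy_type_with_top10 := by
  intro row pm thr _ _
  unfold Spec_assign_policy_type_with_top10
  unfold assign_policy_type_with_top10 assign_policy_type_with_top10_alt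
  obtain ⟨_, _, hrel⟩ := pv_main row thr ((PySem.Dict.ofList pm).items)
    PySem.Dict.empty ("None", none) (by simp [PySem.Dict.empty])
    (by simp [PySem.Dict.empty, PySem.Dict.keys])
    (by constructor <;> rfl)
  set D := ((PySem.Dict.ofList pm).items).foldl (pvStepA row thr) PySem.Dict.empty with hD
  set B := ((PySem.Dict.ofList pm).items).foldl (pvStepB row thr) ("None", none) with hB
  rcases hb : B.2 with _ | bv
  · rw [PvRel, hb] at hrel
    have hsz : D.size = 0 := by
      simp only [PySem.Dict.size, hrel.1, List.length_nil]
    simp [hsz, hrel.2]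
  · rw [PvRel, hb] at hrel
    have hne : D.items ≠ [] := by
      intro h
      have hk : D.keys = [] := by simp [PySem.Dict.keys, h]
      have hmx := hrel.2.1
      rw [hk] at hmx
      simp [PySem.List.max?] at hmx
    have hsz : D.size ≠ 0 := by
      simp only [PySem.Dict.size]
      exact fun h => hne (List.eq_nil_of_length_eq_zero h)
    rw [if_pos hsz, hrel.2.1]
    rfl
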